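-- pv_equiv track=rewrite | github.com/Gendo90/topCoder | 400-600 pts/topcoderTwain.py | yearFive
-- ===== SOURCE A (Python) =====
-- def yearFive(words):
--     words = words.split(" ")
--     newWords = []
--     for word in words:
--         if(word[0:3]=="sch"):
--             this_word = word.replace("sch", "sk")
--         else:
--             this_word = word
--         while("chr" in this_word):
--             spot = this_word.find("chr")
--             l = [a for a in this_word]
--             l[spot] = "k"
--             l.pop(spot+1)
--             this_word = "".join(a for a in l)
--         l = [a for a in this_word]
--         for i, letter in enumerate(l):
--             if(letter=="c"):
--                 if(i==len(l)-1):
--                     l[i] = "k"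
--                 elif(i+1<len(l) and l[i+1]!="h"):
--                     l[i] = "k"
--         this_word = "".join(a for a in l)
--         newWords.append(this_word)
--     words = " ".join(newWords)
--     return words
-- ===== SOURCE B (Python) =====
-- def yearFive(words):
--     newWords = []
--     for word in words.split(" "):
--         if word[0:3] == "sch":
--             word = word.replace("sch", "sk")
--         res = []
--         i = 0
--         n = len(word)
--         while i < n:
--             if word[i:i+3] == "chr":
--                 res.append("kr")
--                 i += 3
--             elif word[i:i+2] == "ch":
--                 res.append("ch")
--                 i += 2
--             elif word[i] == "c":
--                 res.append("k")
--                 i += 1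
--             else:
--                 res.append(word[i])
--                 i += 1
--         newWords.append("".join(res))
--     return " ".join(newWords)
-- ===== Notes on version B (the rewrite author's own statement) =====
-- stated objective: simpler
-- what changed: A repeatedly rescans each word with find('chr') rewriting one occurrence per pass and then runs a second index pass turning lone 'c' into 'k'; B does both in a single left-to-right scan per word (chr->kr, ch kept, c->k), keeping the verbatim 'sch'->'sk' prefix-gated replace.
import Mathlib
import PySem

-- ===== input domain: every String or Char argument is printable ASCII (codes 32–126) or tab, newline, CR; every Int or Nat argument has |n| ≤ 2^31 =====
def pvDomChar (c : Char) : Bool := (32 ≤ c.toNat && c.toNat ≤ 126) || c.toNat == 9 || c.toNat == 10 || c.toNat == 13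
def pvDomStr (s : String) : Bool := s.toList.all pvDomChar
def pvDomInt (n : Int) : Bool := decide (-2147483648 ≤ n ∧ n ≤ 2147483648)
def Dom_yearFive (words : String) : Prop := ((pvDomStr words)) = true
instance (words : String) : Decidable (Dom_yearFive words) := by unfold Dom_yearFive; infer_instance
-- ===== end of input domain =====

-- B replaces A's repeated rescan-and-rewrite "chr" loop plus the separate c-pass by one
-- left-to-right scan (chr → kr, ch kept, lone c → k); objective: simpler, one pass per word.

-- ===== PORT A =====
-- while "chr" in this_word: spot = find; l[spot] = "k"; l.pop(spot+1)
def yearFiveChrLoop (w : List Char) : List Char :=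
  if PySem.Chars.isIn ['c', 'h', 'r'] w then
    let spot := PySem.Chars.find w ['c', 'h', 'r']
    let l1 := PySem.List.pySetD w spot 'k'
    match h : PySem.List.pop? l1 (spot + 1) with
    | some r => yearFiveChrLoop r.2
    | none => l1   -- unreachable: spot + 1 is in range whenever "chr" occurs at spot
  else w
termination_by w.length
decreasing_by
  have h1 := PySem.List.length_of_pop?_eq_some l1 h
  have h2 := PySem.List.length_pySetD w spot 'k'
  simp only [l1] at h1
  omega

-- the body of A's c-pass: enumerate over the live list (its length never changes, and
-- letter = l[i] as read at the start of iteration i), ported as a fold over the indices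
def yearFiveCStep (acc : List Char) (i : Nat) : List Char :=
  let letter := acc.getD i ' '
  if letter = 'c' then
    if i = acc.length - 1 then acc.set i 'k'
    else if i + 1 < acc.length ∧ acc.getD (i + 1) ' ' ≠ 'h' then acc.set i 'k'
    else acc
  else acc

def yearFiveCPass (w : List Char) : List Char :=
  (List.range w.length).foldl yearFiveCStep w

def yearFiveWordA (w : List Char) : List Char :=
  let tw := if PySem.List.slice w (some 0) (some 3) = ['s', 'c', 'h']
            then PySem.Chars.replace w ['s', 'c', 'h'] ['s', 'k'] else w
  yearFiveCPass (yearFiveChrLoop tw)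

def yearFive (words : String) : String :=
  String.ofList (PySem.Chars.join [' '] ((PySem.Chars.splitOn words.toList [' ']).map yearFiveWordA))

-- ===== PORT B =====
-- B's while loop over the index i, appending to res; ported as recursion on the unread suffix
-- (word[i:i+3] == "chr" is a take-3 test on the suffix, advancing i drops the consumed chars)
def yearFiveScan (w : List Char) : List Char :=
  match w with
  | [] => []
  | a :: t =>
    if (a :: t).take 3 = ['c', 'h', 'r'] then 'k' :: 'r' :: yearFiveScan (t.drop 2)
    else if (a :: t).take 2 = ['c', 'h'] then 'c' :: 'h' :: yearFiveScan (t.drop 1)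
    else if a = 'c' then 'k' :: yearFiveScan t
    else a :: yearFiveScan t
termination_by w.length
decreasing_by all_goals (simp; try omega)

def yearFiveWordB (w : List Char) : List Char :=
  let tw := if PySem.List.slice w (some 0) (some 3) = ['s', 'c', 'h']
            then PySem.Chars.replace w ['s', 'c', 'h'] ['s', 'k'] else w
  yearFiveScan tw

def yearFive_alt (words : String) : String :=
  String.ofList (PySem.Chars.join [' '] ((PySem.Chars.splitOn words.toList [' ']).map yearFiveWordB))

-- ===== PRECONDITION & SPEC =====
def Spec_yearFive (words : String) (out : String) : Prop := out = yearFive_alt words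
instance (words : String) (out : String) : Decidable (Spec_yearFive words out) := by unfold Spec_yearFive; infer_instance

-- ===== CLAIM (what is proved, stated in full; the proofs are below) =====
def Claim_equal_yearFive : Prop := ∀ (words : String), Dom_yearFive words → Spec_yearFive words (yearFive words)

-- ===== LEMMAS AND PROOFS =====

-- proof-only recursive restatement of A's while loop: rewrite every "chr" left to right
def chrS : List Char → List Char
  | [] => []
  | a :: t =>
    if a = 'c' ∧ t.take 2 = ['h', 'r'] then 'k' :: 'r' :: chrS (t.drop 2)
    else a :: chrS t
termination_by l => l.length
decreasing_by all_goals (simp; try omega)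

-- proof-only recursive restatement of A's c-pass: c → k unless followed by h
def cPassS : List Char → List Char
  | [] => []
  | a :: t => (if a = 'c' ∧ (t = [] ∨ t.take 1 ≠ ['h']) then 'k' else a) :: cPassS t

lemma chr_pre (s : List Char) : (['c', 'h', 'r'] <+: s) ↔ ∃ u, s = 'c' :: 'h' :: 'r' :: u := by
  constructor
  · rintro ⟨t, rfl⟩; exact ⟨t, rfl⟩
  · rintro ⟨u, rfl⟩; exact ⟨u, rfl⟩

lemma set_append_add (l₁ l₂ : List Char) (n : Nat) (v : Char) :
    (l₁ ++ l₂).set (l₁.length + n) v = l₁ ++ l₂.set n v := by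
  induction l₁ with
  | nil => simp
  | cons a t ih => simpa [Nat.succ_add, List.set_cons_succ] using ih

lemma eraseIdx_append_add (l₁ l₂ : List Char) (n : Nat) :
    (l₁ ++ l₂).eraseIdx (l₁.length + n) = l₁ ++ l₂.eraseIdx n := by
  induction l₁ with
  | nil => simp
  | cons a t ih => simpa [Nat.succ_add, List.eraseIdx_cons_succ] using ih

lemma find_chr_zero (l : List Char) (h : ['c', 'h', 'r'] <+: l) :
    PySem.Chars.find l ['c', 'h', 'r'] = 0 := by
  have hnn : 0 ≤ PySem.Chars.find l ['c', 'h', 'r'] :=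
    (PySem.Chars.find_nonneg_iff l _).mpr h.isInfix
  obtain ⟨-, h2⟩ := PySem.Chars.find_spec hnn
  by_contra hne
  exact h2 0 (by omega) (by simpa using h)

lemma find_chr_cons (a : Char) (t : List Char)
    (h0 : ¬ ['c', 'h', 'r'] <+: (a :: t)) (h1 : ['c', 'h', 'r'] <:+: t) :
    PySem.Chars.find (a :: t) ['c', 'h', 'r'] = PySem.Chars.find t ['c', 'h', 'r'] + 1 := by
  have hcons : ['c', 'h', 'r'] <:+: (a :: t) := List.infix_cons_iff.mpr (Or.inr h1)
  have hj : 0 ≤ PySem.Chars.find (a :: t) ['c', 'h', 'r'] :=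
    (PySem.Chars.find_nonneg_iff _ _).mpr hcons
  have hm : 0 ≤ PySem.Chars.find t ['c', 'h', 'r'] :=
    (PySem.Chars.find_nonneg_iff _ _).mpr h1
  obtain ⟨hj1, hj2⟩ := PySem.Chars.find_spec hj
  obtain ⟨hm1, hm2⟩ := PySem.Chars.find_spec hm
  set j := (PySem.Chars.find (a :: t) ['c', 'h', 'r']).toNat with hjd
  set m := (PySem.Chars.find t ['c', 'h', 'r']).toNat with hmd
  have hjne : j ≠ 0 := by
    intro e
    rw [e] at hj1
    exact h0 (by simpa using hj1)
  have hd : List.drop j (a :: t) = List.drop (j - 1) t := by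
    conv_lhs => rw [show j = (j - 1) + 1 by omega]
    exact List.drop_succ_cons
  rw [hd] at hj1
  have h3 : ¬ (j - 1 < m) := fun hlt => hm2 _ hlt hj1
  have h4 : ¬ (m + 1 < j) := by
    intro hlt
    exact hj2 (m + 1) hlt (by simpa [List.drop_succ_cons] using hm1)
  omega

lemma loop_cons_aux : ∀ (n : Nat) (t : List Char), t.length ≤ n → ∀ a : Char,
    ¬ ['c', 'h', 'r'] <+: (a :: t) → yearFiveChrLoop (a :: t) = a :: yearFiveChrLoop t := by
  intro n
  induction n with
  | zero =>
    intro t ht a h0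
    have ht0 : t = [] := List.eq_nil_of_length_eq_zero (by omega)
    subst ht0
    have e1 : PySem.Chars.isIn ['c', 'h', 'r'] [a] = false := by
      rw [PySem.Chars.isIn_eq_false_iff]
      intro hin
      have := hin.length_le
      simp at this
    have e0 : PySem.Chars.isIn ['c', 'h', 'r'] ([] : List Char) = false := by decide
    rw [yearFiveChrLoop, yearFiveChrLoop]
    simp [e1, e0]
  | succ n ih =>
    intro t ht a h0
    by_cases hin : PySem.Chars.isIn ['c', 'h', 'r'] t = true
    · -- there is a "chr" inside t, at position m
      have hinf : ['c', 'h', 'r'] <:+: t := (PySem.Chars.isIn_iff_infix _ _).mp hin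
      have hmnn : 0 ≤ PySem.Chars.find t ['c', 'h', 'r'] :=
        (PySem.Chars.find_nonneg_iff _ _).mpr hinf
      obtain ⟨hm1, -⟩ := PySem.Chars.find_spec hmnn
      obtain ⟨m, hfm⟩ : ∃ m : Nat, PySem.Chars.find t ['c', 'h', 'r'] = (m : Int) :=
        ⟨_, (Int.toNat_of_nonneg hmnn).symm⟩
      rw [hfm] at hm1
      simp only [Int.toNat_natCast] at hm1
      obtain ⟨u, hu⟩ := (chr_pre _).mp hm1
      have hle : m ≤ t.length := by
        by_contra hgt
        rw [List.drop_eq_nil_of_le (by omega)] at hu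
        simp at hu
      have hlen : m + 3 ≤ t.length := by
        have := congrArg List.length hu
        simp [List.length_drop] at this
        omega
      obtain ⟨pre, hprelen, ht2⟩ :
          ∃ pre : List Char, pre.length = m ∧ t = pre ++ 'c' :: 'h' :: 'r' :: u := by
        refine ⟨t.take m, by simp [List.length_take]; omega, ?_⟩
        conv_lhs => rw [← List.take_append_drop m t]
        rw [hu]
      have hfind : PySem.Chars.find (a :: t) ['c', 'h', 'r'] = ((m + 1 : Nat) : Int) := by
        rw [find_chr_cons a t h0 hinf, hfm]
        push_cast
        ring
      have hincons : PySem.Chars.isIn ['c', 'h', 'r'] (a :: t) = true :=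
        (PySem.Chars.isIn_iff_infix _ _).mpr (List.infix_cons_iff.mpr (Or.inr hinf))
      have hsett : t.set m 'k' = pre ++ 'k' :: 'h' :: 'r' :: u := by
        conv_lhs => rw [ht2]
        have := set_append_add pre ('c' :: 'h' :: 'r' :: u) 0 'k'
        simpa [hprelen] using this
      have htstep2 : (t.set m 'k').eraseIdx (m + 1) = pre ++ 'k' :: 'r' :: u := by
        rw [hsett]
        have := eraseIdx_append_add pre ('k' :: 'h' :: 'r' :: u) 1
        simpa [hprelen] using this
      have hpop_t : PySem.List.pop? (t.set m 'k') ((m + 1 : Nat) : Int)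
          = some ((t.set m 'k')[m + 1]'(by simp [List.length_set]; omega),
                  (t.set m 'k').eraseIdx (m + 1)) :=
        PySem.List.pop?_natCast _ _ (by simp [List.length_set]; omega)
      -- one iteration of A's loop on t
      have hstep_t : yearFiveChrLoop t = yearFiveChrLoop ((t.set m 'k').eraseIdx (m + 1)) := by
        rw [yearFiveChrLoop]
        simp only [hin, if_true]
        have ecast : ((m : Int) + 1) = ((m + 1 : Nat) : Int) := by push_cast; ring
        split
        next r heq =>
          rw [hfm, PySem.List.pySetD_natCast, ecast, hpop_t] at heq
          obtain rfl : _ = r := Option.some.inj heq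
          rfl
        next heq =>
          rw [hfm, PySem.List.pySetD_natCast, ecast, hpop_t] at heq
          exact absurd heq (by simp)
      -- one iteration of A's loop on a :: t
      have hpop_at : PySem.List.pop? (a :: t.set m 'k') ((m + 2 : Nat) : Int)
          = some ((a :: t.set m 'k')[m + 2]'(by simp [List.length_set]; omega),
                  (a :: t.set m 'k').eraseIdx (m + 2)) :=
        PySem.List.pop?_natCast _ _ (by simp [List.length_set]; omega)
      have hstep_at : yearFiveChrLoop (a :: t)
          = yearFiveChrLoop (a :: (t.set m 'k').eraseIdx (m + 1)) := by
        rw [yearFiveChrLoop]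
        simp only [hincons, if_true]
        have ecast : (((m + 1 : Nat) : Int) + 1) = ((m + 2 : Nat) : Int) := by push_cast; ring
        split
        next r heq =>
          rw [hfind, PySem.List.pySetD_natCast, List.set_cons_succ, ecast, hpop_at] at heq
          obtain rfl : _ = r := Option.some.inj heq
          show yearFiveChrLoop ((a :: t.set m 'k').eraseIdx (m + 2)) = _
          rw [show m + 2 = (m + 1) + 1 from rfl, List.eraseIdx_cons_succ]
        next heq =>
          rw [hfind, PySem.List.pySetD_natCast, List.set_cons_succ, ecast, hpop_at] at heq
          exact absurd heq (by simp)
      have hnpre : ¬ ['c', 'h', 'r'] <+: (a :: (t.set m 'k').eraseIdx (m + 1)) := by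
        rw [htstep2]
        intro hp
        obtain ⟨v, hv⟩ := (chr_pre _).mp hp
        match pre, hv with
        | [], hv => simp at hv
        | [x], hv => simp at hv
        | x :: y :: pre', hv =>
          simp only [List.cons_append, List.cons.injEq] at hv
          obtain ⟨ha, hx, hy, -⟩ := hv
          apply h0
          rw [chr_pre]
          exact ⟨pre' ++ 'c' :: 'h' :: 'r' :: u, by rw [ht2, ha, hx, hy]; simp⟩
      have hlstep : ((t.set m 'k').eraseIdx (m + 1)).length ≤ n := by
        have h1 := congrArg List.length htstep2
        have h2 := congrArg List.length ht2
        simp at h1 h2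
        omega
      rw [hstep_at, hstep_t, ih _ hlstep a hnpre]
    · -- no "chr" in t: neither loop does anything
      rw [Bool.not_eq_true] at hin
      have hfa : PySem.Chars.isIn ['c', 'h', 'r'] (a :: t) = false := by
        rw [PySem.Chars.isIn_eq_false_iff]
        intro hinf
        rcases List.infix_cons_iff.mp hinf with hp | hi
        · exact h0 hp
        · rw [PySem.Chars.isIn_eq_false_iff] at hin
          exact hin hi
      rw [yearFiveChrLoop, yearFiveChrLoop]
      simp [hfa, hin]

lemma loop_cons (t : List Char) (a : Char) (h0 : ¬ ['c', 'h', 'r'] <+: (a :: t)) :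
    yearFiveChrLoop (a :: t) = a :: yearFiveChrLoop t :=
  loop_cons_aux t.length t le_rfl a h0

lemma chrS_cons_not (a : Char) (t : List Char) (h : ¬ ['c', 'h', 'r'] <+: (a :: t)) :
    chrS (a :: t) = a :: chrS t := by
  rw [chrS]
  rw [if_neg]
  rintro ⟨rfl, htk⟩
  apply h
  rw [chr_pre]
  match t, htk with
  | x :: y :: u, htk =>
    simp only [List.take, List.cons.injEq, and_true] at htk
    exact ⟨u, by rw [htk.1, htk.2]⟩
  | [], htk => simp at htk
  | [x], htk => simp at htk

lemma chrLoop_eq_aux : ∀ (n : Nat) (l : List Char), l.length ≤ n → yearFiveChrLoop l = chrS l := by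
  intro n
  induction n with
  | zero =>
    intro l hl
    have h0 : l = [] := List.eq_nil_of_length_eq_zero (by omega)
    subst h0
    rw [yearFiveChrLoop]
    simp [show PySem.Chars.isIn ['c', 'h', 'r'] ([] : List Char) = false from by decide, chrS]
  | succ n ih =>
    intro l hl
    match l with
    | [] =>
      rw [yearFiveChrLoop]
      simp [show PySem.Chars.isIn ['c', 'h', 'r'] ([] : List Char) = false from by decide, chrS]
    | a :: t =>
      by_cases hpre : ['c', 'h', 'r'] <+: (a :: t)
      · obtain ⟨u, hu⟩ := (chr_pre _).mp hpre
        obtain ⟨rfl, rfl⟩ : a = 'c' ∧ t = 'h' :: 'r' :: u := by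
          simp only [List.cons.injEq] at hu
          exact hu
        have hin : PySem.Chars.isIn ['c', 'h', 'r'] ('c' :: 'h' :: 'r' :: u) = true :=
          (PySem.Chars.isIn_iff_infix _ _).mpr hpre.isInfix
        have hf : PySem.Chars.find ('c' :: 'h' :: 'r' :: u) ['c', 'h', 'r'] = 0 :=
          find_chr_zero _ hpre
        have hpop : PySem.List.pop? ('k' :: 'h' :: 'r' :: u) ((1 : Nat) : Int)
            = some (('k' :: 'h' :: 'r' :: u)[1], ('k' :: 'h' :: 'r' :: u).eraseIdx 1) :=
          PySem.List.pop?_natCast _ 1 (by simp)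
        have hstep : yearFiveChrLoop ('c' :: 'h' :: 'r' :: u) = yearFiveChrLoop ('k' :: 'r' :: u) := by
          rw [yearFiveChrLoop]
          simp only [hin, if_true, hf]
          have hset : PySem.List.pySetD ('c' :: 'h' :: 'r' :: u) (0 : Int) 'k'
              = 'k' :: 'h' :: 'r' :: u := by
            rw [PySem.List.pySetD_of_nonneg _ _ (le_refl (0 : Int))]
            simp
          have ecast : (0 : Int) + 1 = ((1 : Nat) : Int) := by norm_num
          split
          next r heq =>
            rw [hf, hset, ecast, hpop] at heq
            obtain rfl : _ = r := Option.some.inj heq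
            rfl
          next heq =>
            rw [hf, hset, ecast, hpop] at heq
            exact absurd heq (by simp)
        have hk : ¬ ['c', 'h', 'r'] <+: ('k' :: 'r' :: u) := by
          intro hp
          obtain ⟨v, hv⟩ := (chr_pre _).mp hp
          simp at hv
        have hr : ¬ ['c', 'h', 'r'] <+: ('r' :: u) := by
          intro hp
          obtain ⟨v, hv⟩ := (chr_pre _).mp hp
          simp at hv
        have hul : u.length ≤ n := by
          simp only [List.length_cons] at hl
          omega
        rw [hstep, loop_cons _ _ hk, loop_cons _ _ hr, ih u hul]
        rw [chrS]
        norm_num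
      · rw [loop_cons t a hpre, ih t (by simp only [List.length_cons] at hl; omega),
            chrS_cons_not a t hpre]

lemma chrLoop_eq (l : List Char) : yearFiveChrLoop l = chrS l :=
  chrLoop_eq_aux l.length l le_rfl

lemma cStep_at (done rest : List Char) (x : Char) :
    yearFiveCStep (done ++ x :: rest) done.length
      = done ++ (if x = 'c' ∧ (rest = [] ∨ rest.take 1 ≠ ['h']) then 'k' else x) :: rest := by
  have hget : (done ++ x :: rest).getD done.length ' ' = x := by
    rw [List.getD_eq_getElem?_getD, List.getElem?_append_right (le_refl done.length)]
    simp
  simp only [yearFiveCStep]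
  rw [hget]
  by_cases hx : x = 'c'
  · subst hx
    rw [if_pos rfl]
    match rest with
    | [] =>
      rw [if_pos (by simp)]
      have := set_append_add done ['c'] 0 'k'
      simpa using this
    | b :: t =>
      rw [if_neg (by simp only [List.length_append, List.length_cons]; omega)]
      have hget2 : (done ++ 'c' :: b :: t).getD (done.length + 1) ' ' = b := by
        rw [List.getD_eq_getElem?_getD, List.getElem?_append_right (by omega)]
        simp
      by_cases hb : b = 'h'
      · rw [if_neg (by rintro ⟨-, hne⟩; exact hne (by rw [hget2, hb]))]
        simp [hb]
      · rw [if_pos ⟨by simp only [List.length_append, List.length_cons]; omega,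
              by rw [hget2]; exact hb⟩]
        have := set_append_add done ('c' :: b :: t) 0 'k'
        simp only [Nat.add_zero] at this
        rw [this]
        simp [hb]
  · rw [if_neg hx]
    simp [hx]

lemma cPass_inv (rest done : List Char) :
    (List.range' done.length rest.length 1).foldl yearFiveCStep (done ++ rest)
      = done ++ cPassS rest := by
  induction rest generalizing done with
  | nil => simp [cPassS]
  | cons x rest ih =>
    rw [show (x :: rest).length = rest.length + 1 from rfl, List.range'_succ, List.foldl_cons,
       cStep_at, cPassS]
    have h := ih (done ++ [if x = 'c' ∧ (rest = [] ∨ rest.take 1 ≠ ['h']) then 'k' else x])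
    simpa [List.append_assoc] using h

lemma cPass_eq (w : List Char) : yearFiveCPass w = cPassS w := by
  have h := cPass_inv w []
  simpa [yearFiveCPass, List.range_eq_range'] using h

lemma chrS_cons_head (b : Char) (t : List Char) :
    ∃ x rest, chrS (b :: t) = x :: rest ∧ (x = b ∨ x = 'k') := by
  rw [chrS]
  split
  · exact ⟨'k', _, rfl, Or.inr rfl⟩
  · exact ⟨b, _, rfl, Or.inl rfl⟩

lemma cPassS_cons_ne (a : Char) (t : List Char) (h : a ≠ 'c') : cPassS (a :: t) = a :: cPassS t := by
  rw [cPassS]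
  simp [h]

lemma scan_eq_aux : ∀ (n : Nat) (l : List Char), l.length ≤ n →
    cPassS (chrS l) = yearFiveScan l := by
  intro n
  induction n with
  | zero =>
    intro l hl
    have h0 : l = [] := List.eq_nil_of_length_eq_zero (by omega)
    subst h0
    simp [yearFiveScan, chrS, cPassS]
  | succ n ih =>
    intro l hl
    match l with
    | [] => simp [yearFiveScan, chrS, cPassS]
    | a :: t =>
      have hlt : t.length ≤ n := by simp only [List.length_cons] at hl; omega
      by_cases h3 : a = 'c' ∧ t.take 2 = ['h', 'r']
      · obtain ⟨rfl, htk⟩ := h3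
        obtain ⟨u, rfl⟩ : ∃ u, t = 'h' :: 'r' :: u := by
          match t, htk with
          | x :: y :: u, htk =>
            simp only [List.take, List.cons.injEq, and_true] at htk
            exact ⟨u, by rw [htk.1, htk.2]⟩
          | [], htk => simp at htk
          | [x], htk => simp at htk
        have hul : u.length ≤ n := by simp only [List.length_cons] at hl; omega
        rw [chrS, if_pos ⟨rfl, rfl⟩]
        rw [cPassS_cons_ne _ _ (by decide), cPassS_cons_ne _ _ (by decide)]
        rw [yearFiveScan]
        simp [ih u hul]
      · have hchrS : chrS (a :: t) = a :: chrS t := by rw [chrS, if_neg h3]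
        rw [hchrS]
        by_cases hc : a = 'c'
        · subst hc
          by_cases hh : t.take 1 = ['h']
          · obtain ⟨u, rfl⟩ : ∃ u, t = 'h' :: u := by
              match t, hh with
              | x :: u, hh =>
                simp only [List.take, List.cons.injEq, and_true] at hh
                exact ⟨u, by rw [hh]⟩
              | [], hh => simp at hh
            have hur : u.take 1 ≠ ['r'] := by
              intro hr
              apply h3
              refine ⟨rfl, ?_⟩
              match u, hr with
              | y :: u', hr =>
                simp only [List.take, List.cons.injEq, and_true] at hr
                simp [hr]
              | [], hr => simp at hr
            have hul : u.length ≤ n := by simp only [List.length_cons] at hl; omega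
            have h2 : chrS ('h' :: u) = 'h' :: chrS u := by
              rw [chrS, if_neg (by rintro ⟨hb, -⟩; exact absurd hb (by decide))]
            rw [h2]
            rw [cPassS, if_neg (by
              intro hcc
              rcases hcc.2 with hnil | hne
              · exact absurd hnil (by simp)
              · exact hne rfl)]
            rw [cPassS_cons_ne _ _ (by decide)]
            rw [yearFiveScan]
            simp [ih u hul, hur]
          · have hne2 : t.take 2 ≠ ['h', 'r'] := by
              intro he
              apply hh
              have h12 : List.take 1 t = List.take 1 (List.take 2 t) := by
                simp [List.take_take]
              rw [h12, he]
              rfl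
            have hcond : chrS t = [] ∨ (chrS t).take 1 ≠ ['h'] := by
              match t with
              | [] => exact Or.inl (by simp [chrS])
              | b :: t' =>
                right
                obtain ⟨x, rest, hx, hr⟩ := chrS_cons_head b t'
                rw [hx]
                have hbh : b ≠ 'h' := by
                  intro e
                  exact hh (by simp [e])
                rcases hr with rfl | rfl
                · simp [hbh]
                · simp
            rw [cPassS, if_pos ⟨rfl, hcond⟩]
            rw [yearFiveScan]
            simp [ih t hlt, hne2, hh]
        · rw [cPassS_cons_ne _ _ hc]
          rw [yearFiveScan]
          simp [ih t hlt, hc]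

lemma scan_eq (l : List Char) : cPassS (chrS l) = yearFiveScan l :=
  scan_eq_aux l.length l le_rfl

lemma word_eq (w : List Char) : yearFiveWordA w = yearFiveWordB w := by
  show yearFiveCPass (yearFiveChrLoop _) = yearFiveScan _
  rw [chrLoop_eq, cPass_eq, scan_eq]

-- ===== VERDICT (by name: the statement is the Claim_ definition above) =====
theorem yearFive_spec : Claim_equal_yearFive := by
  intro words _
  show yearFive words = yearFive_alt words
  unfold yearFive yearFive_alt
  rw [funext word_eq]
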